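-- pv_equiv track=rewrite | github.com/Moushmi-DM-20/DSA-ProblemSolving-Java | Python Interview Questions and Answers/037. Palindrome Date.py | splitDate
-- ===== SOURCE A (Python) =====
-- def splitDate(date):
--     day=month=year = 0
--     resDate = []
--     c = ""
--     count = 0
--     for i in date:
--         if i!="/":
--             c+=i
--         else:
--             if count==0:
--                 day = c
--                 if int(day)<10:
--                     day = '0'+day
--                     resDate.append(day)
--             elif count==1:
--                 month = c
--                 if int(month)<10:
--                     month = '0'+month
--                     resDate.append(month)
--             c=""
--             count+=1
--     year = c
--     if int(year)<1000:
--         year = '0'+year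
--         resDate.append(year)
--     return resDate
-- ===== SOURCE B (Python) =====
-- def splitDate(date):
--     parts = date.split('/')
--     resDate = []
--     if len(parts) >= 2 and int(parts[0]) < 10:
--         resDate.append('0' + parts[0])
--     if len(parts) >= 3 and int(parts[1]) < 10:
--         resDate.append('0' + parts[1])
--     if int(parts[-1]) < 1000:
--         resDate.append('0' + parts[-1])
--     return resDate
-- ===== Notes on version B (the rewrite author's own statement) =====
-- stated objective: idiomatic
-- what changed: B tokenizes the whole string once with date.split('/') and reads the day/month/year parts by index (parts[0], parts[1], parts[-1]) under length guards, replacing A's character-by-character accumulator loop with a running '/' counter.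
import Mathlib
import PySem

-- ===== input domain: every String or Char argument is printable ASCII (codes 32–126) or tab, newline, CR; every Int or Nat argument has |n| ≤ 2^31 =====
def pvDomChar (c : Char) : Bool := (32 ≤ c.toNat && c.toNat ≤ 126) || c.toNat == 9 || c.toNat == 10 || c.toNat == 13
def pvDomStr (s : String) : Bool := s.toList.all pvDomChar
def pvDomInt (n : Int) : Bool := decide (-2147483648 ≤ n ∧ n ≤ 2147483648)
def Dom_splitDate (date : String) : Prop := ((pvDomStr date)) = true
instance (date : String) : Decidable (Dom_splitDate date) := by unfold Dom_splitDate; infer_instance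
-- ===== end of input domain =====

-- B tokenizes once with date.split('/') and reads the three relevant parts by index,
-- instead of A's character-by-character accumulator loop (objective: more idiomatic; same cost).

-- ===== PORT A =====
-- A's for-loop over the characters, as structural recursion over the same state
-- (resDate, current segment c, count of '/' seen); the trailing-year step is the [] case.
-- int(s) is ported as (PySem.Int.ofChars? s).getD 0 — Pre_splitDate excludes the inputs
-- where Python's int() raises ValueError.
def splitDateLoop : List Char → List String → List Char → Nat → List String
  | [], res, c, _count =>
      -- year = c; if int(year) < 1000: append '0'+year
      if (PySem.Int.ofChars? c).getD 0 < 1000 then res ++ [String.ofList ('0' :: c)] else res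
  | i :: rest, res, c, count =>
      if i ≠ '/' then splitDateLoop rest res (c ++ [i]) count
      else if count = 0 then
        splitDateLoop rest
          (if (PySem.Int.ofChars? c).getD 0 < 10 then res ++ [String.ofList ('0' :: c)] else res)
          [] (count + 1)
      else if count = 1 then
        splitDateLoop rest
          (if (PySem.Int.ofChars? c).getD 0 < 10 then res ++ [String.ofList ('0' :: c)] else res)
          [] (count + 1)
      else splitDateLoop rest res [] (count + 1)

def splitDate (date : String) : List String := splitDateLoop date.toList [] [] 0

-- ===== PORT B =====
-- date.split('/') for the single-character separator '/' is exactly List.splitOn '/' on the code points.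
def splitDate_alt (date : String) : List String :=
  let parts := date.toList.splitOn '/'
  let r1 : List String :=
    if 2 ≤ parts.length ∧ (PySem.Int.ofChars? (parts.getD 0 [])).getD 0 < 10
    then [String.ofList ('0' :: parts.getD 0 [])] else []
  let r2 : List String :=
    if 3 ≤ parts.length ∧ (PySem.Int.ofChars? (parts.getD 1 [])).getD 0 < 10
    then [String.ofList ('0' :: parts.getD 1 [])] else []
  let lastPart := PySem.List.pyGetD parts (-1) []
  let r3 : List String :=
    if (PySem.Int.ofChars? lastPart).getD 0 < 1000 then [String.ofList ('0' :: lastPart)] else []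
  r1 ++ r2 ++ r3

-- ===== PRECONDITION & SPEC =====
-- Pre_ excludes exactly the inputs on which Python A raises ValueError: the int() calls A
-- actually performs are int(parts[0]) when there are ≥ 2 '/'-separated parts, int(parts[1])
-- when there are ≥ 3, and int(parts[-1]) always.
def Pre_splitDate (date : String) : Prop :=
  (2 ≤ (date.toList.splitOn '/').length →
    (PySem.Int.ofChars? ((date.toList.splitOn '/').getD 0 [])).isSome = true) ∧
  (3 ≤ (date.toList.splitOn '/').length →
    (PySem.Int.ofChars? ((date.toList.splitOn '/').getD 1 [])).isSome = true) ∧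
  (PySem.Int.ofChars? (PySem.List.pyGetD (date.toList.splitOn '/') (-1) [])).isSome = true
instance (date : String) : Decidable (Pre_splitDate date) := by unfold Pre_splitDate; infer_instance

def pvWitness_splitDate : String := "3/12/972"

def Spec_splitDate (date : String) (out : List String) : Prop := out = splitDate_alt date
instance (date : String) (out : List String) : Decidable (Spec_splitDate date out) := by unfold Spec_splitDate; infer_instance

-- ===== CLAIM (what is proved, stated in full; the proofs are below) =====
def Claim_equal_splitDate : Prop := ∀ (date : String), Dom_splitDate date → Pre_splitDate date → Spec_splitDate date (splitDate date)

-- ===== LEMMAS AND PROOFS =====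

-- what A appends for a completed segment c when it is the count-th part (count < 2 appends padded single digits)
def pvStage (count : Nat) (c : List Char) : List String :=
  if count ≤ 1 ∧ (PySem.Int.ofChars? c).getD 0 < 10 then [String.ofList ('0' :: c)] else []

-- what A appends for the final (year) segment
def pvYear (c : List Char) : List String :=
  if (PySem.Int.ofChars? c).getD 0 < 1000 then [String.ofList ('0' :: c)] else []

-- A's result as a function of the list of '/'-separated parts and the running count
def pvG : Nat → List (List Char) → List String
  | _, [] => []
  | _, [p] => pvYear p
  | count, p :: q :: rest => pvStage count p ++ pvG (count + 1) (q :: rest)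

theorem pvModifyHead_append_nil {α : Type} (t : List (List α)) :
    List.modifyHead (fun x => [] ++ x) t = t := by cases t <;> simp

theorem pvModifyHead_comp {α : Type} (c : List α) (i : α) (t : List (List α)) :
    List.modifyHead (fun x => c ++ x) (List.modifyHead (List.cons i) t)
      = List.modifyHead (fun x => (c ++ [i]) ++ x) t := by
  cases t <;> simp

-- the loop invariant: the loop's value is res ++ (pvG over the parts of the remaining input,
-- with the pending segment c glued onto the first part)
theorem pvLoop_eq (l : List Char) : ∀ (res : List String) (c : List Char) (count : Nat),
    splitDateLoop l res c count
      = res ++ pvG count (List.modifyHead (fun x => c ++ x) (l.splitOn '/')) := by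
  induction l with
  | nil =>
      intro res c count
      simp [splitDateLoop, List.splitOn, List.splitOnP_nil, pvG, pvYear]
      split_ifs <;> simp
  | cons i rest ih =>
      intro res c count
      by_cases hi : i = '/'
      · subst hi
        have hsp : ('/' :: rest).splitOn '/' = [] :: rest.splitOn '/' := by
          simp [List.splitOn, List.splitOnP_cons]
        rw [hsp]
        obtain ⟨q, r, hqr⟩ := List.exists_cons_of_ne_nil
          (show List.splitOn '/' rest ≠ [] from List.splitOnP_ne_nil _ _)
        have hmod : List.modifyHead (fun x => c ++ x) ([] :: rest.splitOn '/')
            = c :: rest.splitOn '/' := by simp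
        rw [hmod, hqr]
        match count with
        | 0 =>
            have hL : splitDateLoop ('/' :: rest) res c 0
                = splitDateLoop rest
                    (if (PySem.Int.ofChars? c).getD 0 < 10 then res ++ [String.ofList ('0' :: c)] else res)
                    [] 1 := by simp [splitDateLoop]
            rw [hL, ih, hqr, pvModifyHead_append_nil]
            simp only [pvG, pvStage]
            split_ifs <;> simp_all
        | 1 =>
            have hL : splitDateLoop ('/' :: rest) res c 1
                = splitDateLoop rest
                    (if (PySem.Int.ofChars? c).getD 0 < 10 then res ++ [String.ofList ('0' :: c)] else res)
                    [] 2 := by simp [splitDateLoop]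
            rw [hL, ih, hqr, pvModifyHead_append_nil]
            simp only [pvG, pvStage]
            split_ifs <;> simp_all
        | (n + 2) =>
            have hL : splitDateLoop ('/' :: rest) res c (n + 2)
                = splitDateLoop rest res [] (n + 3) := by
              simp [splitDateLoop]
            rw [hL, ih, hqr, pvModifyHead_append_nil]
            simp only [pvG, pvStage]
            split_ifs <;> simp_all
      · have hsp : (i :: rest).splitOn '/' = List.modifyHead (List.cons i) (rest.splitOn '/') := by
          simp [List.splitOn, List.splitOnP_cons, hi]
        rw [hsp, pvModifyHead_comp]
        have hL : splitDateLoop (i :: rest) res c count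
            = splitDateLoop rest res (c ++ [i]) count := by
          simp [splitDateLoop, hi]
        rw [hL]
        exact ih res (c ++ [i]) count

-- for counts ≥ 2 pvG only keeps the final (year) part
theorem pvG_big : ∀ (ps : List (List Char)) (p : List Char) (count : Nat), 2 ≤ count →
    pvG count (p :: ps) = pvYear ((p :: ps).getLast (by simp)) := by
  intro ps
  induction ps with
  | nil => intro p count _; simp [pvG]
  | cons q r ih =>
      intro p count hc
      have hst : pvStage count p = [] := by
        simp [pvStage]; intro h; omega
      simp only [pvG, hst, List.nil_append]
      rw [ih q (count + 1) (by omega)]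
      simp [List.getLast_cons]

-- pvG at count 0 is exactly B's three indexed checks
theorem pvG_zero_eq_alt (date : String) :
    pvG 0 (date.toList.splitOn '/') = splitDate_alt date := by
  obtain ⟨p, ps, hps⟩ := List.exists_cons_of_ne_nil
    (show List.splitOn '/' date.toList ≠ [] from List.splitOnP_ne_nil _ _)
  unfold splitDate_alt
  rw [hps]
  match ps with
  | [] =>
      have h1 : PySem.List.pyGetD [p] (-1) ([] : List Char) = p := by
        simp [PySem.List.pyGetD, PySem.List.pyGet?, PySem.List.pyIdx?]
      simp [pvG, pvYear, h1]
  | [q] =>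
      have h2 : PySem.List.pyGetD [p, q] (-1) ([] : List Char) = q := by
        simp [PySem.List.pyGetD, PySem.List.pyGet?, PySem.List.pyIdx?]
      simp only [pvG, pvStage, pvYear, h2]
      split_ifs <;> simp_all <;> omega
  | q :: r :: rs =>
      have hlast : PySem.List.pyGetD (p :: q :: r :: rs) (-1) ([] : List Char)
          = (r :: rs).getLast (by simp) := by
        have := PySem.List.pyGetD_neg_one (p :: q :: r :: rs) ([] : List Char) (by simp)
        rw [this]
        simp [List.getLast_cons]
      simp only [pvG, pvStage]
      rw [pvG_big rs r 2 (by omega)]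
      simp only [hlast, pvYear]
      split_ifs <;> simp_all <;> omega

-- ===== VERDICT (by name: the statement is the Claim_ definition above) =====
theorem splitDate_spec : Claim_equal_splitDate := by
  intro date _ _
  unfold Spec_splitDate splitDate
  rw [pvLoop_eq, pvModifyHead_append_nil, pvG_zero_eq_alt]
  simp
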